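-- pv_equiv track=rewrite | github.com/Deepanraj1508/ai-data-cleaner | backend/services/ai_service.py | parse_ai_suggestions
-- ===== SOURCE A (Python) =====
-- from typing import Dict, List
--
-- def parse_ai_suggestions(text: str) -> Dict:
--     """Parse AI response into structured suggestions"""
--     suggestions = {}
--
--     # Simple parsing logic - can be enhanced
--     lines = text.split('\n')
--     current_category = None
--
--     for line in lines:
--         line = line.strip()
--         if line.startswith('1.') or 'column' in line.lower():
--             current_category = 'column_naming'
--             suggestions[current_category] = line
--         elif line.startswith('2.') or 'format' in line.lower():
--             current_category = 'date_format'
--             suggestions[current_category] = line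
--         elif line.startswith('3.') or 'missing' in line.lower():
--             current_category = 'missing_values'
--             suggestions[current_category] = line
--         elif line.startswith('4.') or 'validation' in line.lower():
--             current_category = 'data_validation'
--             suggestions[current_category] = line
--
--     return suggestions
-- ===== SOURCE B (Python) =====
-- PREFIXES = ["1.", "2.", "3.", "4."]
-- KEYWORDS = ["column", "format", "missing", "validation"]
-- CATS = ["column_naming", "date_format", "missing_values", "data_validation"]
--
--
-- def _classify(line):
--     """Index of the highest-priority matching rule, or None."""
--     low = line.lower()
--     hits = [i for i, (p, k) in enumerate(zip(PREFIXES, KEYWORDS))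
--             if line.startswith(p) or k in low]
--     return min(hits) if hits else None
--
--
-- def parse_ai_suggestions(text: str):
--     """Parse AI response into structured suggestions (gather then group-by)."""
--     tagged = []
--     for raw in text.split('\n'):
--         line = raw.strip()
--         i = _classify(line)
--         if i is not None:
--             tagged.append((CATS[i], line))
--     order = list(dict.fromkeys(k for k, _ in tagged))
--     return {c: [v for k, v in tagged if k == c][-1] for c in order}
-- ===== Notes on version B (the rewrite author's own statement) =====
-- stated objective: alternative
-- what changed: Replaces A's single-pass if/elif cascade that mutates the dict per line with a staged gather/group-by: classify every stripped line to a rule index as the min over all matching rule indices, collect (category, line) tags, then build the result per category in first-occurrence order taking the last tagged line.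
import Mathlib
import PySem

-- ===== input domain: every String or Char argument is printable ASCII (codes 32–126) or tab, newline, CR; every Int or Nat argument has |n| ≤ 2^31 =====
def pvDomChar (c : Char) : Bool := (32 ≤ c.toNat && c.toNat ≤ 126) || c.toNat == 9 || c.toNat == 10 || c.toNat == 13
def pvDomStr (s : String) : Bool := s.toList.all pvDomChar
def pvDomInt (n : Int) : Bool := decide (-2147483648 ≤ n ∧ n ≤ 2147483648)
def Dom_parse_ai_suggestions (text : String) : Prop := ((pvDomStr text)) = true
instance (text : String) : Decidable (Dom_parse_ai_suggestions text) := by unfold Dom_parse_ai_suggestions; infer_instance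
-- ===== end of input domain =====

-- B replaces A's single-pass if/elif dict mutation by a staged gather/group-by:
-- classify every line (min over matching rule indices), then build the dict per
-- category from the tagged list (objective: alternative); return values agree everywhere.


-- ===== PORT A =====
-- loop body of A: state is (suggestions, current_category), branches in source order
def pvStepA (st : PySem.Dict String String × Option String) (raw : String) :
    PySem.Dict String String × Option String :=
  let line := PySem.Str.strip raw
  if PySem.Str.startswith line "1." || PySem.Str.isIn "column" (PySem.Str.lower line) then
    (st.1.insert "column_naming" line, some "column_naming")
  else if PySem.Str.startswith line "2." || PySem.Str.isIn "format" (PySem.Str.lower line) then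
    (st.1.insert "date_format" line, some "date_format")
  else if PySem.Str.startswith line "3." || PySem.Str.isIn "missing" (PySem.Str.lower line) then
    (st.1.insert "missing_values" line, some "missing_values")
  else if PySem.Str.startswith line "4." || PySem.Str.isIn "validation" (PySem.Str.lower line) then
    (st.1.insert "data_validation" line, some "data_validation")
  else st

def parse_ai_suggestions (text : String) : List (String × String) :=
  ((((PySem.Str.split? text "\n").getD []).foldl pvStepA
      (PySem.Dict.empty, none)).1).items

-- ===== PORT B =====
def pvPrefixes : List String := ["1.", "2.", "3.", "4."]
def pvKeywords : List String := ["column", "format", "missing", "validation"]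
def pvCats : List String := ["column_naming", "date_format", "missing_values", "data_validation"]

-- _classify: min over the indices of all matching rules, or None
def pvClassify (line : String) : Option Int :=
  let low := PySem.Str.lower line
  let hits := ((PySem.List.enumerate (pvPrefixes.zip pvKeywords)).filter
      (fun e => PySem.Str.startswith line e.2.1 || PySem.Str.isIn e.2.2 low)).map Prod.fst
  if hits = [] then none else PySem.List.min? hits (fun x => x)

def parse_ai_suggestions_alt (text : String) : List (String × String) :=
  let tagged := ((PySem.Str.split? text "\n").getD []).foldl (fun acc raw =>
      let line := PySem.Str.strip raw
      match pvClassify line with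
      | some i => acc ++ [(PySem.List.pyGetD pvCats i "", line)]  -- i ∈ {0,1,2,3}: CATS[i] never raises
      | none => acc) []
  let order := PySem.List.dedup (tagged.map Prod.fst)
  -- '[v for k, v in tagged if k == c][-1]': c ∈ order ⇒ the filter is nonempty, so the
  -- getLastD default "" is unreachable and [-1] is exactly the last element
  order.map (fun c => (c, ((tagged.filter (fun p => p.1 == c)).map Prod.snd).getLastD ""))

-- ===== PRECONDITION & SPEC =====
def Spec_parse_ai_suggestions (text : String) (out : List (String × String)) : Prop := out = parse_ai_suggestions_alt text
instance (text : String) (out : List (String × String)) : Decidable (Spec_parse_ai_suggestions text out) := by unfold Spec_parse_ai_suggestions; infer_instance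

-- ===== CLAIM =====
def Claim_equal_parse_ai_suggestions : Prop := ∀ (text : String), Dom_parse_ai_suggestions text → Spec_parse_ai_suggestions text (parse_ai_suggestions text)

-- ===== LEMMAS AND PROOFS =====

-- the per-(cat,line) dict step both programs reduce to
def pvIns (d : PySem.Dict String String) (p : String × String) : PySem.Dict String String :=
  d.insert p.1 p.2

-- B's tagged entry for one raw line
def pvTag (raw : String) : List (String × String) :=
  let line := PySem.Str.strip raw
  match pvClassify line with
  | some i => [(PySem.List.pyGetD pvCats i "", line)]
  | none => []

-- pvClassify, characterised as the first matching rule (min of a sorted hits list)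
theorem pvClassify_char (line : String) :
    pvClassify line =
      (if PySem.Str.startswith line "1." || PySem.Str.isIn "column" (PySem.Str.lower line) then some 0
       else if PySem.Str.startswith line "2." || PySem.Str.isIn "format" (PySem.Str.lower line) then some 1
       else if PySem.Str.startswith line "3." || PySem.Str.isIn "missing" (PySem.Str.lower line) then some 2
       else if PySem.Str.startswith line "4." || PySem.Str.isIn "validation" (PySem.Str.lower line) then some 3
       else none) := by
  simp only [pvClassify, pvPrefixes, pvKeywords,
    show PySem.List.enumerate (List.zip ["1.", "2.", "3.", "4."]
        ["column", "format", "missing", "validation"]) =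
      [((0 : Int), ("1.", "column")), (1, ("2.", "format")),
       (2, ("3.", "missing")), (3, ("4.", "validation"))] from rfl]
  by_cases h1 : (PySem.Str.startswith line "1." || PySem.Str.isIn "column" (PySem.Str.lower line)) = true <;>
  by_cases h2 : (PySem.Str.startswith line "2." || PySem.Str.isIn "format" (PySem.Str.lower line)) = true <;>
  by_cases h3 : (PySem.Str.startswith line "3." || PySem.Str.isIn "missing" (PySem.Str.lower line)) = true <;>
  by_cases h4 : (PySem.Str.startswith line "4." || PySem.Str.isIn "validation" (PySem.Str.lower line)) = true <;>
  simp only [List.filter, h1, h2, h3, h4, List.map] <;> rfl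

-- per line, A's cascade's dict component is the insert of B's classification (if any)
theorem pvStepA_fst (d : PySem.Dict String String) (cur : Option String) (raw : String) :
    (pvStepA (d, cur) raw).1 = (pvTag raw).foldl pvIns d := by
  simp only [pvStepA, pvTag, pvClassify_char]
  split_ifs <;> rfl

-- A's fold over lines, projected to the dict, is the insert-fold over B's tagged list
theorem pvFoldA_eq (lines : List String) (d : PySem.Dict String String) (cur : Option String) :
    (lines.foldl pvStepA (d, cur)).1 = (lines.flatMap pvTag).foldl pvIns d := by
  induction lines generalizing d cur with
  | nil => rfl
  | cons raw rest ih =>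
      simp only [List.foldl_cons, List.flatMap_cons, List.foldl_append]
      rcases hA : pvStepA (d, cur) raw with ⟨d1, c1⟩
      have h := pvStepA_fst d cur raw
      rw [hA] at h
      simp only at h
      rw [ih, h]

-- the value an insert-fold leaves at key k is the LAST tagged value for k
theorem pvGetD_foldl (l : List (String × String)) (d : PySem.Dict String String) (k : String) :
    (l.foldl pvIns d).getD k "" =
      ((l.filter (fun p => p.1 == k)).map Prod.snd).getLastD (d.getD k "") := by
  induction l generalizing d with
  | nil => rfl
  | cons p rest ih =>
      simp only [List.foldl_cons, List.filter_cons]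
      by_cases h : p.1 = k
      · simp only [h, beq_self_eq_true, if_pos, List.map_cons, List.getLastD_cons]
        rw [ih]
        simp [pvIns, h]
      · have hb : (p.1 == k) = false := by simp [h]
        have hg : (pvIns d p).getD k "" = d.getD k "" := by
          simpa [pvIns] using PySem.Dict.getD_insert_of_ne (k' := k) (k := p.1) d p.2 ""
            (fun hh => h hh.symm)
        simp only [hb, Bool.false_eq_true, if_neg, not_false_iff]
        rw [ih, hg]

-- B's tagged list, written as a flatMap (the foldl-append loop flattened)
theorem pvTagged_eq (lines : List String) :
    (lines.foldl (fun acc raw =>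
      let line := PySem.Str.strip raw
      match pvClassify line with
      | some i => acc ++ [(PySem.List.pyGetD pvCats i "", line)]
      | none => acc) []) = lines.flatMap pvTag := by
  have h : ∀ (acc : List (String × String)),
      (lines.foldl (fun acc raw =>
        let line := PySem.Str.strip raw
        match pvClassify line with
        | some i => acc ++ [(PySem.List.pyGetD pvCats i "", line)]
        | none => acc) acc) = acc ++ lines.flatMap pvTag := by
    induction lines with
    | nil => simp
    | cons raw rest ih =>
        intro acc
        simp only [List.foldl_cons, List.flatMap_cons, pvTag]
        cases hc : pvClassify (PySem.Str.strip raw) <;>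
          simp [ih, List.append_assoc]
  simpa using h []

-- ===== VERDICT =====
theorem parse_ai_suggestions_spec : Claim_equal_parse_ai_suggestions := by
  intro text _
  unfold Spec_parse_ai_suggestions parse_ai_suggestions parse_ai_suggestions_alt
  rw [pvTagged_eq, pvFoldA_eq]
  set l := (((PySem.Str.split? text "\n").getD []).flatMap pvTag) with hl
  have hnd : (l.foldl pvIns PySem.Dict.empty).keys.Nodup := by
    simpa [pvIns] using PySem.Dict.nodup_keys_foldl_insert_key l Prod.fst
      (fun d p => p.2) PySem.Dict.empty (by simp)
  have hkeys : (l.foldl pvIns PySem.Dict.empty).keys = PySem.List.dedup (l.map Prod.fst) := by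
    simpa [pvIns, PySem.Set.update_nil_left, PySem.List.dedup_eq_ofList] using
      PySem.Dict.keys_foldl_insert_key l Prod.fst (fun d p => p.2) PySem.Dict.empty
  rw [PySem.Dict.items_eq_map_keys _ hnd "", hkeys]
  refine List.map_congr_left (fun c hc => ?_)
  rw [pvGetD_foldl]
  simp [PySem.Dict.getD_empty]
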